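-- pv_equiv track=rewrite | github.com/cyberixae/scut | src/scut.py | build
-- ===== SOURCE A (Python) =====
-- def split(line):
--     ws = [' ','\t','\n','\r']
--     sep = False
--     buf = ''
--     for i in range(len(line)):
--         c = line[i]
--         if c in ws:
--             if sep:
--                 buf += c
--             else:
--                 yield buf
--                 sep = True
--                 buf = c
--         else:
--             if sep:
--                 yield buf
--                 sep = False
--                 buf = c
--             else:
--                 buf += c
--     yield buf
--
-- def build(speced, line):
--     parts = list(split(line))
--     def get(i):
--         try:
--             return parts[i]
--         except:
--             return ''
--     glued = [' '.join([get((int(x)-1)*2) for x in p.split('+')]) for p in speced]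
--     return glued
-- ===== SOURCE B (Python) =====
-- def build(speced, line):
--     # staged: find class-change cut points, slice the line into runs, then index
--     ws = ' \t\n\r'
--     n = len(line)
--     cuts = [0] + [i for i in range(1, n) if (line[i] in ws) != (line[i - 1] in ws)] + [n]
--     runs = [line[a:b] for a, b in zip(cuts, cuts[1:])]
--     if line and line[0] in ws:
--         runs = [''] + runs
--     L = len(runs)
--     def get(k):
--         if k < 0:
--             k += L
--         return runs[k] if 0 <= k < L else ''
--     return [' '.join(get((int(x) - 1) * 2) for x in p.split('+')) for p in speced]
-- ===== Notes on version B (the rewrite author's own statement) =====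
-- stated objective: alternative
-- what changed: Replaces A's char-by-char sep/buf state-machine generator with a staged computation: a comprehension collects the positions where the whitespace class changes, the line is sliced into runs between consecutive cut points (prepending the empty leading word when the line starts with whitespace), and the try/except indexing helper becomes an explicit wrap-and-bounds check. Pre_ excludes inputs where A raises ValueError (a '+'-piece of a spec entry that int() cannot parse); B raises there too.
import Mathlib
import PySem

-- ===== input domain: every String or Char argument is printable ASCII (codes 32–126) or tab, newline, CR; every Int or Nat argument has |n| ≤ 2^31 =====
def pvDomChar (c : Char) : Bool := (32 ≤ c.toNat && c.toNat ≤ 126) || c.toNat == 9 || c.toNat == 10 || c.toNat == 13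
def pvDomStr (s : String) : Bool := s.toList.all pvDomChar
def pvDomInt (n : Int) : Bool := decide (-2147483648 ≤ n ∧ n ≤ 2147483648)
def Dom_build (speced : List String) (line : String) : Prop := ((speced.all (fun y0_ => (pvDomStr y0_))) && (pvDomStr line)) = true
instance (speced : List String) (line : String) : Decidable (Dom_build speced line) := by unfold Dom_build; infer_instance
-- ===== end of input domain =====

-- B replaces A's char-by-char sep/buf state machine with a staged computation: it first
-- finds the class-change cut points of the line, slices the line into runs between
-- consecutive cuts, prepends the empty leading word when the line starts with whitespace,
-- and resolves indices by an explicit wrap-and-bounds check instead of try/except;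
-- objective: alternative.

-- ===== PORT A =====
def pvIsWs (c : Char) : Bool := c == ' ' || c == '\t' || c == '\n' || c == '\r'

-- A's generator `split`, as a recursion over the characters with the (sep, buf) state;
-- the final `yield buf` is the base case.
def pvSplitA : List Char → Bool → List Char → List (List Char)
  | [], _, buf => [buf]
  | c :: rest, sep, buf =>
    if pvIsWs c then
      if sep then pvSplitA rest true (buf ++ [c])
      else buf :: pvSplitA rest true [c]
    else
      if sep then buf :: pvSplitA rest false [c]
      else pvSplitA rest false (buf ++ [c])

-- A's `get`: parts[i] with Python indexing, '' on IndexError.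
def pvGetA (parts : List (List Char)) (i : Int) : List Char :=
  (PySem.List.pyGet? parts i).getD []

def build (speced : List String) (line : String) : List String :=
  let parts := pvSplitA line.toList false []
  speced.map (fun p =>
    PySem.Str.join " " (((PySem.Str.split? p "+").getD []).map (fun x =>
      String.ofList (pvGetA parts (((PySem.Int.ofStr? x).getD 0 - 1) * 2)))))

-- ===== PORT B =====
-- cuts inner comprehension: positions where the whitespace class changes; the indices
-- drawn from range(1, n) are always in range, so the pyGetD default is never used.
def pvChanges (cs : List Char) : List Int :=
  (PySem.List.pyRange 1 (cs.length : Int) 1).filter (fun i =>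
    pvIsWs (PySem.List.pyGetD cs i ' ') != pvIsWs (PySem.List.pyGetD cs (i - 1) ' '))

-- cuts = [0] + [...] + [n]
def pvCuts (cs : List Char) : List Int := 0 :: (pvChanges cs ++ [(cs.length : Int)])

-- runs = [line[a:b] for a, b in zip(cuts, cuts[1:])]  (cuts[1:] on a nonempty list = tail)
def pvRunsB (cs : List Char) : List (List Char) :=
  (((pvCuts cs).zip (pvCuts cs).tail).map (fun ab => PySem.List.slice cs (some ab.1) (some ab.2)))

-- if line and line[0] in ws: runs = [''] + runs
def pvPartsB (cs : List Char) : List (List Char) :=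
  match cs with
  | [] => pvRunsB cs
  | c :: _ => if pvIsWs c then [] :: pvRunsB cs else pvRunsB cs

-- B's `get`: wrap a negative index by the length, then an explicit bounds check.
def pvGetB (runs : List (List Char)) (k : Int) : List Char :=
  let L : Int := runs.length
  let k' := if k < 0 then k + L else k
  if 0 ≤ k' ∧ k' < L then (PySem.List.pyGet? runs k').getD [] else []

def build_alt (speced : List String) (line : String) : List String :=
  let runs := pvPartsB line.toList
  speced.map (fun p =>
    PySem.Str.join " " (((PySem.Str.split? p "+").getD []).map (fun x =>
      String.ofList (pvGetB runs (((PySem.Int.ofStr? x).getD 0 - 1) * 2)))))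

-- ===== PRECONDITION & SPEC =====
-- Pre_ excludes exactly the inputs on which Python A raises ValueError: a spec entry
-- containing a '+'-separated piece that int() cannot parse (int(x) is evaluated outside
-- the try of `get`); B raises there too.
def Pre_build (speced : List String) (line : String) : Prop :=
  ∀ p ∈ speced, ∀ x ∈ (PySem.Str.split? p "+").getD [], (PySem.Int.ofStr? x).isSome = true
instance (speced : List String) (line : String) : Decidable (Pre_build speced line) := by
  unfold Pre_build; infer_instance

def pvWitness_build : List String × String := (["1", "1+2"], " a b\t")

def Spec_build (speced : List String) (line : String) (out : List String) : Prop := out = build_alt speced line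
instance (speced : List String) (line : String) (out : List String) : Decidable (Spec_build speced line out) := by unfold Spec_build; infer_instance

-- ===== CLAIM (what is proved, stated in full; the proofs are below) =====
def Claim_equal_build : Prop := ∀ (speced : List String) (line : String), Dom_build speced line → Pre_build speced line → Spec_build speced line (build speced line)

-- ===== LEMMAS AND PROOFS =====

-- the canonical grouping of a string into maximal same-whitespace-class runs
def pvGrp : List Char → List (List Char)
  | [] => []
  | c :: rest =>
    (c :: rest.takeWhile (fun d => pvIsWs d == pvIsWs c)) ::
      pvGrp (rest.dropWhile (fun d => pvIsWs d == pvIsWs c))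
  termination_by cs => cs.length
  decreasing_by
    simp only [List.length_cons]
    exact Nat.lt_succ_of_le (List.length_dropWhile_le _ _)

-- merge buf into the first group when that group's class is the machine's current class
def pvGlue (buf : List Char) (sep : Bool) : List (List Char) → List (List Char)
  | [] => [buf]
  | g :: gs => if pvIsWs (g.headD ' ') == sep then (buf ++ g) :: gs else buf :: g :: gs

lemma pvGlue_spec (rest buf : List Char) (b : Bool) :
    pvGlue buf b (pvGrp rest)
      = (buf ++ rest.takeWhile (fun d => pvIsWs d == b)) ::
          pvGrp (rest.dropWhile (fun d => pvIsWs d == b)) := by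
  cases rest with
  | nil => simp [pvGrp, pvGlue]
  | cons d r =>
    rw [pvGrp]
    by_cases h : pvIsWs d = b
    · simp [pvGlue, h]
    · have h' : (pvIsWs d == b) = false := by simp [h]
      simp [pvGlue, h', pvGrp]

-- the state machine computes glue-of-grouping
lemma pvSplitA_eq_glue : ∀ (cs : List Char) (sep : Bool) (buf : List Char),
    pvSplitA cs sep buf = pvGlue buf sep (pvGrp cs) := by
  intro cs
  induction cs with
  | nil => intro sep buf; simp [pvSplitA, pvGrp, pvGlue]
  | cons c rest ih =>
    intro sep buf
    rw [pvGrp]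
    by_cases h : pvIsWs c = sep
    · have hsplit : pvSplitA (c :: rest) sep buf = pvSplitA rest sep (buf ++ [c]) := by
        cases hb : pvIsWs c <;> rw [hb] at h <;> simp [pvSplitA, hb, ← h]
      rw [hsplit, ih, pvGlue_spec, h]
      simp [pvGlue, h]
    · have hsplit : pvSplitA (c :: rest) sep buf = buf :: pvSplitA rest (pvIsWs c) [c] := by
        cases hb : pvIsWs c <;> rw [hb] at h <;>
          simp [pvSplitA, hb, eq_comm] at h ⊢ <;> simp [h]
      have h' : (pvIsWs c == sep) = false := by simp [h]
      rw [hsplit, ih, pvGlue_spec]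
      simp [pvGlue, h']


-- A's parts list in closed form
lemma pvSplitA_closed (cs : List Char) :
    pvSplitA cs false []
      = (match cs with
         | [] => [[]]
         | c :: _ => if pvIsWs c then [] :: pvGrp cs else pvGrp cs) := by
  rw [pvSplitA_eq_glue]
  cases cs with
  | nil => simp [pvGrp, pvGlue]
  | cons c rest =>
    rw [pvGrp]
    cases hb : pvIsWs c <;> simp [pvGlue, hb]

-- ---- B side: Nat-level mirrors of the cut/run computation ----
def pvChN (cs : List Char) : List Nat :=
  (List.range' 1 (cs.length - 1)).filter
    (fun i => pvIsWs (cs.getD i ' ') != pvIsWs (cs.getD (i - 1) ' '))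

def pvCutsN (cs : List Char) : List Nat := 0 :: (pvChN cs ++ [cs.length])

def pvRunsN (cs : List Char) : List (List Char) :=
  (((pvCutsN cs).zip (pvCutsN cs).tail).map (fun ab => (cs.drop ab.1).take (ab.2 - ab.1)))

lemma pvChanges_eq (cs : List Char) :
    pvChanges cs = (pvChN cs).map Int.ofNat := by
  unfold pvChanges pvChN
  rw [PySem.List.pyRange_one, List.range'_eq_map_range]
  have h1 : ((cs.length : Int) - 1).toNat = cs.length - 1 := by omega
  have hf : (fun k : Nat => (1 : Int) + (k : Int)) = (Int.ofNat ∘ fun x => 1 + x) := by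
    funext k; simp [Function.comp]
  rw [h1, List.filter_map, List.filter_map, List.map_map, hf]
  congr 1
  apply List.filter_congr
  intro k _
  simp only [Function.comp, Int.ofNat_eq_natCast]
  have h2 : ((1 + k : Nat) : Int) - 1 = ((k : Nat) : Int) := by push_cast; ring
  simp only [PySem.List.pyGetD_natCast]
  rw [h2]
  simp only [PySem.List.pyGetD_natCast]
  simp [Nat.add_comm]

lemma pvRunsB_eq_runsN (cs : List Char) : pvRunsB cs = pvRunsN cs := by
  unfold pvRunsB pvRunsN
  have hc : pvCuts cs = (pvCutsN cs).map Int.ofNat := by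
    unfold pvCuts pvCutsN
    rw [pvChanges_eq]
    simp
  rw [hc, ← List.map_tail, List.zip_map, List.map_map]
  apply List.map_congr_left
  intro ab _
  simp only [Function.comp, Prod.map]
  exact PySem.List.slice_natCast cs ab.1 ab.2
-- class of any character of the leading run (read through getD) is the head's class
lemma pvLead (c : Char) (t r : List Char) (hall : ∀ d ∈ t, pvIsWs d = pvIsWs c)
    (i : Nat) (hi : i ≤ t.length) :
    pvIsWs ((c :: (t ++ r)).getD i ' ') = pvIsWs c := by
  cases i with
  | zero => simp
  | succ j =>
    have hj : j < t.length := by omega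
    rw [List.getD_cons_succ, List.getD_eq_getElem?_getD, List.getElem?_append_left hj,
      List.getElem?_eq_getElem hj]
    simp only [Option.getD_some]
    exact hall _ (List.getElem_mem hj)

-- characters past the leading run are read from the remainder
lemma pvPast (c : Char) (t r : List Char) (j : Nat) :
    (c :: (t ++ r)).getD (t.length + j + 1) ' ' = r.getD j ' ' := by
  rw [List.getD_cons_succ, List.getD_eq_getElem?_getD, List.getD_eq_getElem?_getD,
    List.getElem?_append_right (by omega), Nat.add_sub_cancel_left]

-- decomposition of the change points at the first run boundary
lemma pvChN_append (c : Char) (t r : List Char) (hall : ∀ d ∈ t, pvIsWs d = pvIsWs c)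
    (hhead : ∀ d ∈ r.head?, pvIsWs d ≠ pvIsWs c) :
    pvChN (c :: (t ++ r))
      = (if r = [] then [] else [t.length + 1])
        ++ (pvChN r).map (fun x => x + (t.length + 1)) := by
  unfold pvChN
  have hlen : (c :: (t ++ r)).length - 1 = t.length + r.length := by simp
  rw [hlen, ← List.range'_append (s := 1) (m := t.length) (n := r.length) (step := 1),
    List.filter_append]
  have h1 : List.filter
      (fun i => pvIsWs ((c :: (t ++ r)).getD i ' ') != pvIsWs ((c :: (t ++ r)).getD (i - 1) ' '))
      (List.range' 1 t.length) = [] := by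
    rw [List.filter_eq_nil_iff]
    intro i hi
    rw [List.mem_range'_1] at hi
    rw [pvLead c t r hall i (by omega), pvLead c t r hall (i - 1) (by omega)]
    simp
  rw [h1, List.nil_append]
  cases r with
  | nil => simp
  | cons d r' =>
    simp only [List.length_cons, one_mul]
    have hr : (1 + t.length) :: List.range' (1 + t.length + 1) r'.length 1
        = List.range' (1 + t.length) (r'.length + 1) 1 := (List.range'_succ).symm
    rw [← hr, List.filter_cons]
    have hd0 : (c :: (t ++ d :: r')).getD (1 + t.length) ' ' = d := by
      rw [show 1 + t.length = t.length + 0 + 1 from by omega]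
      exact (pvPast c t (d :: r') 0).trans (by rfl)
    have hdm : pvIsWs ((c :: (t ++ d :: r')).getD (1 + t.length - 1) ' ') = pvIsWs c := by
      have e : 1 + t.length - 1 = t.length := by omega
      rw [e]; exact pvLead c t (d :: r') hall t.length le_rfl
    have hQ : (pvIsWs ((c :: (t ++ d :: r')).getD (1 + t.length) ' ')
        != pvIsWs ((c :: (t ++ d :: r')).getD (1 + t.length - 1) ' ')) = true := by
      rw [hd0, hdm, bne_iff_ne]
      exact hhead d rfl
    rw [hQ]
    simp only [if_true]
    have e2 : 1 + t.length + 1 = (t.length + 1) + 1 := by omega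
    rw [e2, ← List.map_add_range' (s := 1) (n := r'.length) (step := 1), List.filter_map]
    have e3 : 1 + t.length = t.length + 1 := by omega
    rw [e3]
    congr 1
    · -- the shifted predicate is the predicate of the remainder
      have hfil : List.filter
          ((fun i => pvIsWs ((c :: (t ++ d :: r')).getD i ' ')
              != pvIsWs ((c :: (t ++ d :: r')).getD (i - 1) ' ')) ∘ fun x => t.length + 1 + x)
          (List.range' 1 r'.length)
          = List.filter
            (fun i => pvIsWs ((d :: r').getD i ' ') != pvIsWs ((d :: r').getD (i - 1) ' '))
            (List.range' 1 r'.length) := by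
        apply List.filter_congr
        intro j hj
        rw [List.mem_range'_1] at hj
        simp only [Function.comp]
        have ea : t.length + 1 + j = t.length + j + 1 := by omega
        have eb : t.length + j + 1 - 1 = t.length + (j - 1) + 1 := by omega
        rw [ea, pvPast c t (d :: r') j, eb, pvPast c t (d :: r') (j - 1)]
      rw [hfil]
      apply List.map_congr_left
      intro x _
      omega
-- the Nat-level runs are exactly the grouping
lemma pvRunsN_eq_grp_aux : ∀ (N : Nat) (cs : List Char), cs.length ≤ N → cs ≠ [] → pvRunsN cs = pvGrp cs := by
  intro N
  induction N with
  | zero =>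
    intro cs h hne
    cases cs with
    | nil => exact absurd rfl hne
    | cons c rest => simp at h
  | succ N ih =>
    intro cs hlen hne
    match cs, hne with
    | c :: rest, _ =>
    rw [pvGrp]
    have hall : ∀ d ∈ rest.takeWhile (fun d => pvIsWs d == pvIsWs c), pvIsWs d = pvIsWs c := by
      intro d hd; have := List.mem_takeWhile_imp hd; simpa using this
    have hhead : ∀ d ∈ (rest.dropWhile (fun d => pvIsWs d == pvIsWs c)).head?,
        pvIsWs d ≠ pvIsWs c := by
      intro d hd
      have hne' : rest.dropWhile (fun d => pvIsWs d == pvIsWs c) ≠ [] := by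
        intro h0; rw [h0] at hd; simp at hd
      have hh := List.head_dropWhile_not (fun d => pvIsWs d == pvIsWs c) hne'
      have hhd : (rest.dropWhile (fun d => pvIsWs d == pvIsWs c)).head hne' = d := by
        rw [Option.mem_def, List.head?_eq_some_head hne'] at hd
        exact Option.some.inj hd
      rw [hhd] at hh
      simpa using hh
    have hrest : rest = rest.takeWhile (fun d => pvIsWs d == pvIsWs c)
        ++ rest.dropWhile (fun d => pvIsWs d == pvIsWs c) :=
      (List.takeWhile_append_dropWhile).symm
    have hlen2 : (rest.dropWhile (fun d => pvIsWs d == pvIsWs c)).length ≤ N := by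
      have := List.length_dropWhile_le (fun d => pvIsWs d == pvIsWs c) rest
      simp only [List.length_cons] at hlen
      omega
    generalize htw : rest.takeWhile (fun d => pvIsWs d == pvIsWs c) = t at *
    generalize hdw : rest.dropWhile (fun d => pvIsWs d == pvIsWs c) = r at *
    rw [hrest]
    unfold pvRunsN pvCutsN
    rw [pvChN_append c t r hall hhead]
    cases r with
    | nil =>
      simp only [if_true, List.nil_append, pvChN, List.length_nil, List.append_nil]
      simp [pvGrp, List.zip]
    | cons d r' =>
      have hcuts : (0 : Nat) :: ([t.length + 1]
            ++ (pvChN (d :: r')).map (fun x => x + (t.length + 1))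
            ++ [(c :: (t ++ d :: r')).length])
          = 0 :: (pvCutsN (d :: r')).map (fun x => x + (t.length + 1)) := by
        simp [pvCutsN]
        omega
      rw [if_neg (by simp), hcuts]
      have hzip : ((0 :: (pvCutsN (d :: r')).map (fun x => x + (t.length + 1))).zip
            ((0 :: (pvCutsN (d :: r')).map (fun x => x + (t.length + 1))).tail))
          = (0, t.length + 1) ::
            (List.map (Prod.map (fun x => x + (t.length + 1)) (fun x => x + (t.length + 1)))
              ((pvCutsN (d :: r')).zip (pvCutsN (d :: r')).tail)) := by
        rw [List.tail_cons]
        cases hq : pvCutsN (d :: r') with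
        | nil => simp [pvCutsN] at hq
        | cons q0 q1 =>
          have hq0 : q0 = 0 := by simp [pvCutsN] at hq; omega
          subst hq0
          simp only [List.map_cons, Nat.zero_add, List.tail_cons]
          rw [List.zip_cons_cons]
          congr 1
          rw [show ((t.length + 1) :: List.map (fun x => x + (t.length + 1)) q1)
              = List.map (fun x => x + (t.length + 1)) (0 :: q1) from by simp,
            List.zip_map]
      rw [hzip, List.map_cons, List.map_map]
      have hfirst : ((c :: (t ++ d :: r')).drop 0).take (t.length + 1 - 0) = c :: t := by
        simp only [List.drop_zero, Nat.sub_zero, List.take_succ_cons]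
        rw [List.take_left]
      rw [hfirst]
      have hrestmap : List.map
            ((fun ab => ((c :: (t ++ d :: r')).drop ab.1).take (ab.2 - ab.1))
              ∘ Prod.map (fun x => x + (t.length + 1)) (fun x => x + (t.length + 1)))
            ((pvCutsN (d :: r')).zip (pvCutsN (d :: r')).tail)
          = pvRunsN (d :: r') := by
        unfold pvRunsN
        apply List.map_congr_left
        intro ab _
        simp only [Function.comp, Prod.map]
        have e1 : ab.1 + (t.length + 1) = (t.length + ab.1) + 1 := by omega
        have e2 : ab.2 + (t.length + 1) - (ab.1 + (t.length + 1)) = ab.2 - ab.1 := by omega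
        rw [e2, e1, List.drop_succ_cons, ← List.drop_drop, List.drop_left]
      rw [hrestmap]
      exact congrArg _ (ih (d :: r') hlen2 (by simp))

lemma pvParts_eq (cs : List Char) : pvSplitA cs false [] = pvPartsB cs := by
  cases cs with
  | nil => decide
  | cons c rest =>
    rw [pvSplitA_closed]
    unfold pvPartsB
    rw [pvRunsB_eq_runsN, pvRunsN_eq_grp_aux (c :: rest).length _ le_rfl (by simp)]

lemma pvGet_eq (parts : List (List Char)) (k : Int) : pvGetA parts k = pvGetB parts k := by
  unfold pvGetA pvGetB
  by_cases hneg : k < 0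
  · simp only [if_pos hneg]
    by_cases hin : 0 ≤ k + (parts.length : Int)
    · rw [if_pos ⟨hin, by omega⟩]
      have hk : k = -((((-k).toNat : Nat)) : Int) := by omega
      rw [hk, PySem.List.pyGet?_neg_natCast parts ((-k).toNat) (by omega) (by omega),
        PySem.List.pyGet?_of_nonneg parts (by omega)]
      rw [show ((-(((-k).toNat : Nat) : Int)) + (parts.length : Int)).toNat
          = parts.length - (-k).toNat from by omega]
    · rw [if_neg (by omega),
        (PySem.List.pyGet?_eq_none_iff _ _).2 (by simp [PySem.Raise.InRange]; omega),
        Option.getD_none]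
  · simp only [if_neg hneg]
    by_cases hlt : k < (parts.length : Int)
    · rw [if_pos ⟨by omega, hlt⟩]
    · rw [if_neg (by omega),
        (PySem.List.pyGet?_eq_none_iff _ _).2 (by simp [PySem.Raise.InRange]; omega),
        Option.getD_none]

lemma pvBuild_eq (speced : List String) (line : String) :
    build speced line = build_alt speced line := by
  simp only [build, build_alt, pvParts_eq, pvGet_eq]

-- ===== VERDICT (by name: the statement is the Claim_ definition above) =====
theorem build_spec : Claim_equal_build := by
  intro speced line _ _
  unfold Spec_build
  exact pvBuild_eq speced line
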